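-- pv_equiv track=rewrite | github.com/petko940/python-web-tasks | Find Added.py | find_added
-- ===== SOURCE A (Python) =====
-- def find_added(st1, st2):
--     result, st1, st2 = list(), sorted(st1), sorted(st2)
--
--     for i in range(len(st2)):
--         if not st2[i] in st1:
--             result.append(st2[i])
--         else:
--             st1.remove(st2[i])
--
--     return "".join(result)
-- ===== SOURCE B (Python) =====
-- def find_added(st1, st2):
--     cnt = {}
--     for c in st2:
--         cnt[c] = cnt.get(c, 0) + 1
--     for c in st1:
--         if c in cnt:
--             cnt[c] -= 1
--     return "".join(c * cnt[c] for c in sorted(cnt) if cnt[c] > 0)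
-- ===== Notes on version B (the rewrite author's own statement) =====
-- stated objective: faster
-- what changed: Replaces A's sort-both-then-scan loop (list membership test + list.remove per character of st2) with a single frequency table built from st2, decremented by st1, emitted once over the sorted distinct keys.
import Mathlib
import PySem

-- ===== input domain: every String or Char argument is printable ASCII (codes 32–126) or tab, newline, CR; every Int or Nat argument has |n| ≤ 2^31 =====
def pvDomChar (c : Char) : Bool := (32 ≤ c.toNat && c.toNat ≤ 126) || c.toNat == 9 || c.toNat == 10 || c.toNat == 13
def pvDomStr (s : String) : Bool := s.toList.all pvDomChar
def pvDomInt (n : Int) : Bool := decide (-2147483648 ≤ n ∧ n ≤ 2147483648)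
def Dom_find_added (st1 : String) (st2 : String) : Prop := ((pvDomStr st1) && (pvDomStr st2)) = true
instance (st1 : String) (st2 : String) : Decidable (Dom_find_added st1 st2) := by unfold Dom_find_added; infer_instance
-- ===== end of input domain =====

-- B replaces A's quadratic membership/remove scan over a sorted copy by one frequency table and a single sorted emission (objective: faster).


-- ===== PORT A =====
def find_added (st1 : String) (st2 : String) : String :=
  -- result, st1, st2 = list(), sorted(st1), sorted(st2)
  let result : List Char := []
  let s1 := PySem.List.sorted st1.toList (fun x => x) false
  let s2 := PySem.List.sorted st2.toList (fun x => x) false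
  -- for i in range(len(st2)): …
  let fin := (PySem.List.pyRange 0 (s2.length : Int) 1).foldl
    (fun (st : List Char × List Char) i =>
      let c := PySem.List.pyGetD s2 i ' '   -- st2[i]; i is always in range here
      if ¬ (c ∈ st.1) then (st.1, st.2 ++ [c])            -- result.append(st2[i])
      else ((PySem.List.remove? st.1 c).getD st.1, st.2)) -- st1.remove(st2[i]); never raises: c ∈ st.1
    (s1, result)
  String.mk fin.2   -- "".join(result)

-- ===== PORT B =====
def find_added_alt (st1 : String) (st2 : String) : String :=
  -- cnt = {}; for c in st2: cnt[c] = cnt.get(c, 0) + 1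
  let cnt0 := st2.toList.foldl (fun d c => d.insert c (d.getD c 0 + 1)) (PySem.Dict.empty : PySem.Dict Char Int)
  -- for c in st1: if c in cnt: cnt[c] -= 1
  let cnt := st1.toList.foldl (fun d c => if d.contains c then d.insert c (d.getD c 0 - 1) else d) cnt0
  -- return "".join(c * cnt[c] for c in sorted(cnt) if cnt[c] > 0)
  String.mk (((PySem.List.sorted cnt.keys (fun x => x) false).filter
      (fun c => decide (0 < cnt.getD c 0))).flatMap (fun c => PySem.List.pyRepeat [c] (cnt.getD c 0)))

-- ===== PRECONDITION & SPEC =====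
def Spec_find_added (st1 : String) (st2 : String) (out : String) : Prop := out = find_added_alt st1 st2
instance (st1 : String) (st2 : String) (out : String) : Decidable (Spec_find_added st1 st2 out) := by unfold Spec_find_added; infer_instance

-- ===== CLAIM (what is proved, stated in full; the proofs are below) =====
def Claim_equal_find_added : Prop := ∀ (st1 : String) (st2 : String), Dom_find_added st1 st2 → Spec_find_added st1 st2 (find_added st1 st2)

-- ===== LEMMAS AND PROOFS =====

-- A's loop, restated structurally (proof helper only)
def pvLoopA : List Char → List Char → List Char
  | [], _ => []
  | c :: t, s1 => if c ∈ s1 then pvLoopA t (s1.erase c) else c :: pvLoopA t s1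

lemma pvFoldA (s2 : List Char) : ∀ (s1 acc : List Char),
    (s2.foldl
      (fun (st : List Char × List Char) c =>
        if ¬ (c ∈ st.1) then (st.1, st.2 ++ [c])
        else ((PySem.List.remove? st.1 c).getD st.1, st.2)) (s1, acc)).2
    = acc ++ pvLoopA s2 s1 := by
  induction s2 with
  | nil => intro s1 acc; simp [pvLoopA]
  | cons c t ih =>
    intro s1 acc
    rw [List.foldl_cons]
    by_cases hc : c ∈ s1
    · have hr : PySem.List.remove? s1 c = some (s1.erase c) :=
        PySem.List.remove?_eq_some_erase (h := hc)
      simp only [hc, not_true_eq_false, if_false, hr, Option.getD_some, ih, pvLoopA, if_true]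
    · simp only [hc, not_false_eq_true, if_true, ih, pvLoopA, if_false,
        List.append_assoc, List.singleton_append]

lemma pvCount_loopA (a : Char) : ∀ (s2 s1 : List Char),
    (pvLoopA s2 s1).count a = s2.count a - s1.count a := by
  intro s2
  induction s2 with
  | nil => intro s1; simp [pvLoopA]
  | cons c t ih =>
    intro s1
    by_cases hc : c ∈ s1
    · have h1 : 1 ≤ s1.count c := List.one_le_count_iff.mpr hc
      by_cases hac : a = c
      · subst hac
        simp [pvLoopA, hc, ih, List.count_erase_self, List.count_cons_self]
        omega
      · simp [pvLoopA, hc, ih, List.count_erase_of_ne hac, List.count_cons, Ne.symm hac]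
    · by_cases hac : a = c
      · subst hac
        have h0 : s1.count a = 0 := List.count_eq_zero.mpr hc
        simp [pvLoopA, hc, ih, List.count_cons_self, h0]
      · simp [pvLoopA, hc, ih, List.count_cons, Ne.symm hac]

lemma pvSublist_loopA : ∀ (s2 s1 : List Char), List.Sublist (pvLoopA s2 s1) s2 := by
  intro s2
  induction s2 with
  | nil => intro s1; simp [pvLoopA]
  | cons c t ih =>
    intro s1
    by_cases hc : c ∈ s1
    · simpa [pvLoopA, hc] using (ih (s1.erase c)).cons c
    · simpa [pvLoopA, hc] using (ih s1).cons₂ c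

-- B's second loop: the decrement pass keeps the key set and keys list unchanged
lemma pvKeys_loop2 (l : List Char) : ∀ (d : PySem.Dict Char Int),
    (l.foldl (fun d c => if d.contains c then d.insert c (d.getD c 0 - 1) else d) d).keys
      = d.keys := by
  induction l with
  | nil => intro d; simp
  | cons c t ih =>
    intro d
    by_cases hc : d.contains c = true
    · simp [hc, ih, PySem.Dict.keys_insert_of_contains d _ hc]
    · simp [hc, ih]

lemma pvGetD_loop2 (l : List Char) : ∀ (d : PySem.Dict Char Int) (k : Char),
    (l.foldl (fun d c => if d.contains c then d.insert c (d.getD c 0 - 1) else d) d).getD k 0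
      = d.getD k 0 - (if d.contains k then (l.count k : Int) else 0) := by
  induction l with
  | nil => intro d k; simp
  | cons c t ih =>
    intro d k
    by_cases hc : d.contains c = true
    · have hco : ∀ k', (d.insert c (d.getD c 0 - 1)).contains k' = d.contains k' := by
        intro k'
        rw [PySem.Dict.contains_insert]
        by_cases hkc : k' = c
        · subst hkc; simp [hc]
        · simp [hkc]
      simp only [hc, if_true, List.foldl_cons, ih, hco, PySem.Dict.getD_insert]
      by_cases hkc : k = c
      · subst hkc
        simp [hc, List.count_cons_self]
        ring
      · by_cases hdk : d.contains k = true <;>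
          simp [hkc, hdk, List.count_cons, Ne.symm hkc]
    · simp only [hc, if_false, List.foldl_cons, ih, Bool.false_eq_true]
      by_cases hkc : k = c
      · subst hkc; simp [hc]
      · by_cases hdk : d.contains k = true <;>
          simp [hdk, List.count_cons, Ne.symm hkc]

-- counts in a block emission over distinct keys
lemma pvCount_flatMap (n : Char → Int) (a : Char) : ∀ (ks : List Char), ks.Nodup →
    (ks.flatMap (fun c => List.replicate (n c).toNat c)).count a
      = if a ∈ ks then (n a).toNat else 0 := by
  intro ks
  induction ks with
  | nil => intro _; simp
  | cons k t ih =>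
    intro hnd
    rcases List.nodup_cons.mp hnd with ⟨hk, ht⟩
    by_cases hak : a = k
    · subst hak
      simp [List.count_append, ih ht, hk]
    · simp [List.count_append, List.count_replicate, ih ht, hak, Ne.symm hak]

lemma pvPairwise_flatMap (n : Char → Int) : ∀ (ks : List Char), ks.Pairwise (· < ·) →
    (ks.flatMap (fun c => List.replicate (n c).toNat c)).Pairwise (· ≤ ·) := by
  intro ks
  induction ks with
  | nil => intro _; simp
  | cons k t ih =>
    intro hp
    rcases List.pairwise_cons.mp hp with ⟨hlt, ht⟩
    rw [List.flatMap_cons, List.pairwise_append]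
    refine ⟨List.pairwise_replicate.mpr (Or.inr le_rfl), ih ht, ?_⟩
    intro x hx y hy
    have hxk : x = k := List.eq_of_mem_replicate hx
    rcases List.mem_flatMap.mp hy with ⟨c, hc, hyc⟩
    have hyk : y = c := List.eq_of_mem_replicate hyc
    rw [hxk, hyk]
    exact le_of_lt (hlt c hc)

-- ===== VERDICT (by name: the statement is the Claim_ definition above) =====
theorem find_added_spec : Claim_equal_find_added := by
  intro st1 st2 _
  unfold Spec_find_added find_added find_added_alt
  simp only []
  -- A side: reduce the index loop to a structural loop
  rw [PySem.List.foldl_pyRange_zero_pyGetD'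
      (PySem.List.sorted st2.toList (fun x => x) false) ' '
      (fun (st : List Char × List Char) c =>
        if ¬ (c ∈ st.1) then (st.1, st.2 ++ [c])
        else ((PySem.List.remove? st.1 c).getD st.1, st.2))
      (PySem.List.sorted st1.toList (fun x => x) false, [])]
  rw [pvFoldA]
  -- B side: the first loop is Counter(st2)
  rw [PySem.Dict.foldl_insert_getD_add_one_eq_counter]
  set cnt := st1.toList.foldl (fun d c => if d.contains c then d.insert c (d.getD c 0 - 1) else d)
      (PySem.Dict.counter st2.toList) with hcnt
  have hkeys : cnt.keys = PySem.Set.ofList st2.toList := by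
    rw [hcnt, pvKeys_loop2, PySem.Dict.keys_counter]
  have hget : ∀ k, cnt.getD k 0
      = (st2.toList.count k : Int) - (if k ∈ st2.toList then (st1.toList.count k : Int) else 0) := by
    intro k
    rw [hcnt, pvGetD_loop2, PySem.Dict.getD_counter, PySem.Dict.contains_counter]
    by_cases hk : k ∈ st2.toList <;> simp [hk]
  -- the two emitted character lists
  set ks := PySem.List.sorted cnt.keys (fun x => x) false with hks
  have hks_lt : ks.Pairwise (· < ·) := by
    rw [hks, hkeys]; exact PySem.List.sorted_ofList_pairwise_lt st2.toList
  have hks_nd : ks.Nodup := hks_lt.imp ne_of_lt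
  have hmem_ks : ∀ a, a ∈ ks ↔ a ∈ st2.toList := by
    intro a
    rw [hks, PySem.List.mem_sorted, hkeys, PySem.Set.mem_ofList]
  set ks' := ks.filter (fun c => decide (0 < cnt.getD c 0)) with hks'
  have hks'_lt : ks'.Pairwise (· < ·) := hks_lt.filter _
  have hks'_nd : ks'.Nodup := hks'_lt.imp ne_of_lt
  -- rewrite pyRepeat to replicate
  simp only [PySem.List.pyRepeat_singleton]
  -- both sides are the same multiset, both are nondecreasing
  apply congrArg String.mk
  have hA_pw : (pvLoopA (PySem.List.sorted st2.toList (fun x => x) false)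
      (PySem.List.sorted st1.toList (fun x => x) false)).Pairwise (· ≤ ·) := by
    have := PySem.List.sorted_pairwise st2.toList (fun x => x)
    exact this.sublist (pvSublist_loopA _ _)
  have hB_pw : (ks'.flatMap (fun c => List.replicate (cnt.getD c 0).toNat c)).Pairwise (· ≤ ·) :=
    pvPairwise_flatMap _ ks' hks'_lt
  have hperm : (pvLoopA (PySem.List.sorted st2.toList (fun x => x) false)
        (PySem.List.sorted st1.toList (fun x => x) false)).Perm
      (ks'.flatMap (fun c => List.replicate (cnt.getD c 0).toNat c)) := by
    rw [List.perm_iff_count]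
    intro a
    rw [pvCount_loopA, pvCount_flatMap _ _ _ hks'_nd]
    have c2 : (PySem.List.sorted st2.toList (fun x => x) false).count a = st2.toList.count a :=
      (PySem.List.sorted_perm st2.toList (fun x => x) false).count_eq a
    have c1 : (PySem.List.sorted st1.toList (fun x => x) false).count a = st1.toList.count a :=
      (PySem.List.sorted_perm st1.toList (fun x => x) false).count_eq a
    rw [c2, c1]
    have hmem' : a ∈ ks' ↔ a ∈ st2.toList ∧ 0 < cnt.getD a 0 := by
      rw [hks', List.mem_filter, hmem_ks]
      simp
    by_cases ha2 : a ∈ st2.toList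
    · have hg := hget a
      rw [if_pos ha2] at hg
      by_cases hpos : 0 < cnt.getD a 0
      · rw [if_pos (hmem'.mpr ⟨ha2, hpos⟩), hg]
        rw [hg] at hpos
        omega
      · rw [if_neg (fun h => hpos (hmem'.mp h).2)]
        rw [hg] at hpos
        omega
    · have h0 : st2.toList.count a = 0 := List.count_eq_zero.mpr ha2
      rw [if_neg (fun h => ha2 (hmem'.mp h).1), h0]
      omega
  exact PySem.List.eq_of_perm_of_pairwise_le_of_injective (fun x => x) (fun _ _ h => h) hperm hA_pw hB_pw
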